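-- pv_equiv track=rewrite | github.com/Shreya-29s/MIONT-F | ruleOptimization.py | combine_similar_rules
-- ===== SOURCE A (Python) =====
-- from collections import defaultdict
--
-- def combine_similar_rules(rules):
--     combined_rules = []
--
--     if rules:
--         # Combine rules by port or other criteria
--         port_rules = defaultdict(list)
--
--         for rule in rules:
--             if '--dport' in rule:
--                 # Extract port from the rule
--                 port = rule.split('--dport ')[1].split(' ')[0]
--                 port_rules[port].append(rule)
--
--         # For each port, either combine or retain the original rules
--         for port, port_rule_list in port_rules.items():
--             if len(port_rule_list) > 1:
--                 # Combine similar rules into one rule (if more than one rule for the same port)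
--                 combined_rule = f'-p tcp --dport {port} -j DROP'
--                 combined_rules.append(combined_rule)
--             else:
--                 # Keep the individual rule if only one exists for that port
--                 combined_rules.extend(port_rule_list)
--     else:
--         # If no rules are provided, just return an empty list
--         combined_rules = []
--
--     return combined_rules
-- ===== SOURCE B (Python) =====
-- def combine_similar_rules(rules):
--     # One counting pass per port, then a single in-order emit pass with a seen-set
--     # (no per-port rule lists are built).
--     counts = {}
--     for rule in rules:
--         if '--dport' in rule:
--             port = rule.split('--dport ')[1].split(' ')[0]
--             counts[port] = counts.get(port, 0) + 1
--     combined_rules = []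
--     seen = set()
--     for rule in rules:
--         if '--dport' in rule:
--             port = rule.split('--dport ')[1].split(' ')[0]
--             if counts[port] > 1:
--                 if port not in seen:
--                     seen.add(port)
--                     combined_rules.append(f'-p tcp --dport {port} -j DROP')
--             else:
--                 combined_rules.append(rule)
--     return combined_rules
-- ===== Notes on version B (the rewrite author's own statement) =====
-- stated objective: alternative
-- what changed: Instead of grouping rules into per-port lists in a dict and emitting from the dict's items, B builds only a per-port count in a first pass and then emits in a single in-order pass over the source list with a seen-set (combined rule at a port's first occurrence if its count > 1, the original rule otherwise).
-- outside the precondition, e.g. on combine_similar_rules(['block --dport']): A raises IndexError, B raises IndexError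
import Mathlib
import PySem

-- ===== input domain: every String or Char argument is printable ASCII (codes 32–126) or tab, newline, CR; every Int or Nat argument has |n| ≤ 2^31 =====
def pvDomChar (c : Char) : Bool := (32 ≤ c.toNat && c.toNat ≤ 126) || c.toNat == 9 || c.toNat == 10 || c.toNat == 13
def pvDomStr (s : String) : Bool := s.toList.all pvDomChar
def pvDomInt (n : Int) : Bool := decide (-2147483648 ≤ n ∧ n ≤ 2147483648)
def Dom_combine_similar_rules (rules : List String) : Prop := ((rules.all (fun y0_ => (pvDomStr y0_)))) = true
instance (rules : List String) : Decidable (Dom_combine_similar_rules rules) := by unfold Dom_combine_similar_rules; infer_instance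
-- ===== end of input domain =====

-- B replaces A's per-port rule-list grouping dict by a counting pass plus a single in-order
-- emit pass over the source list with a seen-set (objective: alternative decomposition, same value).

-- ===== PORT A =====
-- shared by both ports (both Pythons contain the identical expressions):
-- rule.split('--dport ')[1].split(' ')[0].  The inner .getD "" is the IndexError [1] — excluded
-- by Pre_; the outer .getD "" is unreachable (split with a nonempty separator never returns []).
def portOfRule (rule : String) : String :=
  (PySem.List.pyGet? ((PySem.Str.split? ((PySem.List.pyGet? ((PySem.Str.split? rule "--dport ").getD []) 1).getD "") " ").getD []) 0).getD ""

-- f'-p tcp --dport {port} -j DROP'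
def combinedRule (port : String) : String :=
  "-p tcp --dport " ++ port ++ " -j DROP"

def combine_similar_rules (rules : List String) : List String :=
  if rules = [] then []
  else
    let port_rules : PySem.Dict String (List String) :=
      rules.foldl (fun d rule =>
        if PySem.Str.isIn "--dport" rule then
          d.modify (portOfRule rule) [] (fun x => x ++ [rule])
        else d) PySem.Dict.empty
    port_rules.items.foldl (fun acc p =>
      if p.2.length > 1 then acc ++ [combinedRule p.1] else acc ++ p.2) []

-- ===== PORT B =====
-- counts[port] in the second pass always exists (it was inserted in the first pass), so getD 0 is exact.
def combine_similar_rules_alt (rules : List String) : List String :=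
  let counts : PySem.Dict String Int :=
    rules.foldl (fun d rule =>
      if PySem.Str.isIn "--dport" rule then
        d.insert (portOfRule rule) (d.getD (portOfRule rule) 0 + 1)
      else d) PySem.Dict.empty
  (rules.foldl (fun (st : List String × PySem.Set String) rule =>
      if PySem.Str.isIn "--dport" rule then
        if counts.getD (portOfRule rule) 0 > 1 then
          if PySem.Set.contains st.2 (portOfRule rule) then st
          else (st.1 ++ [combinedRule (portOfRule rule)], PySem.Set.add st.2 (portOfRule rule))
        else (st.1 ++ [rule], st.2)
      else st)
    ([], PySem.Set.empty)).1

-- ===== PRECONDITION & SPEC =====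
-- Pre_ excludes exactly the inputs where A raises IndexError: a rule containing '--dport' but not
-- '--dport ' makes rule.split('--dport ')[1] raise.
def Pre_combine_similar_rules (rules : List String) : Prop :=
  ∀ r ∈ rules, PySem.Str.isIn "--dport" r = true → PySem.Str.isIn "--dport " r = true
instance (rules : List String) : Decidable (Pre_combine_similar_rules rules) := by
  unfold Pre_combine_similar_rules; infer_instance

def pvWitness_combine_similar_rules : List String :=
  ["-A INPUT -p tcp --dport 80 -j ACCEPT", "-A INPUT -p tcp --dport 80 -j DROP",
   "-A INPUT -p tcp --dport 22 -j DROP", "plain rule"]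

def Spec_combine_similar_rules (rules : List String) (out : List String) : Prop := out = combine_similar_rules_alt rules
instance (rules : List String) (out : List String) : Decidable (Spec_combine_similar_rules rules out) := by unfold Spec_combine_similar_rules; infer_instance

-- ===== CLAIM (what is proved, stated in full; the proofs are below) =====
def Claim_equal_combine_similar_rules : Prop := ∀ (rules : List String), Dom_combine_similar_rules rules → Pre_combine_similar_rules rules → Spec_combine_similar_rules rules (combine_similar_rules rules)

-- ===== LEMMAS AND PROOFS =====

lemma contains_eq_mem (s : PySem.Set String) (x : String) : PySem.Set.contains s x = decide (x ∈ s) := by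
  simp [PySem.Set.contains]

lemma set_foldl_add (xs : List String) : ∀ s : PySem.Set String,
    xs.foldl PySem.Set.add s = s ++ (PySem.Set.ofList xs).filter (fun x => !PySem.Set.contains s x) := by
  induction xs with
  | nil => intro s; simp [PySem.Set.ofList, PySem.Set.empty]
  | cons x xs ih =>
    intro s
    have hx : PySem.Set.ofList (x :: xs)
        = PySem.Set.add [] x ++ (PySem.Set.ofList xs).filter (fun y => !PySem.Set.contains (PySem.Set.add [] x) y) := by
      rw [PySem.Set.ofList_eq_foldl]
      simp only [List.foldl_cons]
      rw [ih (PySem.Set.add [] x)]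
    have hadd0 : PySem.Set.add ([] : PySem.Set String) x = [x] := by
      simp [PySem.Set.add, PySem.Set.contains]
    simp only [List.foldl_cons]
    rw [ih (PySem.Set.add s x), hx, hadd0]
    simp only [contains_eq_mem, PySem.Set.add, List.filter_append, List.filter_cons,
      List.filter_filter]
    by_cases hc : x ∈ s
    · simp only [contains_eq_mem, hc, decide_true, Bool.not_true, if_true, Bool.false_eq_true,
        if_false, List.filter_nil, List.nil_append]
      congr 1
      apply List.filter_congr
      intro y _
      by_cases hys : y ∈ s
      · simp [hys]
      · have : y ≠ x := fun h => hys (h ▸ hc)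
        simp [hys, this]
    · simp only [contains_eq_mem, hc, decide_false, Bool.not_false, if_true, Bool.false_eq_true,
        if_false, List.filter_nil, List.append_assoc]
      congr 2
      apply List.filter_congr
      intro y _
      by_cases hys : y ∈ s <;> by_cases hyx : y = x <;>
        simp [hys, hyx, hc]

lemma set_ofList_cons (a : String) (xs : List String) :
    PySem.Set.ofList (a :: xs) = a :: (PySem.Set.ofList xs).filter (fun x => !decide (x = a)) := by
  rw [PySem.Set.ofList_eq_foldl]
  simp only [List.foldl_cons]
  have hadd0 : PySem.Set.add ([] : PySem.Set String) a = [a] := by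
    simp [PySem.Set.add, PySem.Set.contains]
  rw [hadd0, set_foldl_add]
  simp only [contains_eq_mem, List.singleton_append]
  congr 1
  apply List.filter_congr
  intro y _
  cases hy : (y == a) <;> simp_all

def dportPairs (rules : List String) : List (String × String) :=
  (rules.filter (fun r => PySem.Str.isIn "--dport" r)).map (fun r => (portOfRule r, r))

def emitK (l : List (String × String)) (cnt : String → Nat) (k : String) : List String :=
  if 1 < cnt k then [combinedRule k] else (l.filter (fun p => p.1 == k)).map (fun p => p.2)

lemma A_flat (rules : List String) :
    combine_similar_rules rules
      = ((PySem.Set.ofList ((dportPairs rules).map (fun p => p.1))).flatMap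
          (emitK (dportPairs rules) (fun k => (dportPairs rules).countP (fun p => p.1 == k)))) := by
  unfold combine_similar_rules
  by_cases h : rules = []
  · subst h; simp [dportPairs, PySem.Set.ofList, PySem.Set.empty]
  rw [if_neg h]
  simp only []
  simp only [PySem.List.foldl_if_eq_foldl_filter]
  rw [show (rules.filter (fun r => PySem.Str.isIn "--dport" r)).foldl
        (fun d rule => d.modify (portOfRule rule) [] (fun x => x ++ [rule])) PySem.Dict.empty
      = (dportPairs rules).foldl (fun d p => d.modify p.1 [] (fun x => x ++ [p.2])) PySem.Dict.empty from by
    simp [dportPairs, List.foldl_map]]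
  set D := (dportPairs rules).foldl (fun d p => d.modify p.1 [] (fun x => x ++ [p.2])) PySem.Dict.empty with hD
  have hkeys : D.keys = PySem.Set.ofList ((dportPairs rules).map (fun p => p.1)) := by
    rw [hD, PySem.Dict.keys_foldl_modify_key (dportPairs rules) (fun p => p.1) []
          (fun _ p => fun x => x ++ [p.2]) PySem.Dict.empty]
    simp [PySem.Set.update, PySem.Set.ofList, PySem.Dict.keys_empty]
  have hnodup : D.keys.Nodup := by
    rw [hD]
    exact PySem.Dict.nodup_keys_foldl_modify_key _ _ _ _ _ (by simp [PySem.Dict.nodup_keys_empty])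
  have hgetD : ∀ k, D.getD k [] = ((dportPairs rules).filter (fun p => p.1 == k)).map (fun p => p.2) := by
    intro k
    rw [hD, PySem.Dict.getD_foldl_modify_append]
    simp
  have hitems : D.items = D.keys.map (fun k => (k, D.getD k [])) :=
    PySem.Dict.items_eq_map_keys D hnodup []
  rw [hitems, hkeys]
  rw [PySem.List.foldl_congr_mem _ _
        (fun acc p => acc ++ (if p.2.length > 1 then [combinedRule p.1] else p.2)) _
        (by intro acc p _; by_cases hp : p.2.length > 1 <;> simp [hp])]
  rw [PySem.List.foldl_append_eq_flatMap]
  rw [List.flatMap_map]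
  simp only [List.nil_append]
  apply List.flatMap_congr
  intro k _
  rw [hgetD k]
  simp only [emitK, List.length_map, ← List.countP_eq_length_filter]

def scanF (counts : PySem.Dict String Int) : List (String × String) → PySem.Set String → List String
  | [], _ => []
  | p :: t, seen =>
    if counts.getD p.1 0 > 1 then
      if PySem.Set.contains seen p.1 then scanF counts t seen
      else combinedRule p.1 :: scanF counts t (PySem.Set.add seen p.1)
    else p.2 :: scanF counts t seen

lemma counts_getD (rules : List String) (k : String) :
    (rules.foldl (fun d rule =>
      if PySem.Str.isIn "--dport" rule then
        d.insert (portOfRule rule) (d.getD (portOfRule rule) 0 + 1)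
      else d) PySem.Dict.empty).getD k 0
      = ((dportPairs rules).countP (fun p => p.1 == k) : Int) := by
  simp only [PySem.List.foldl_if_eq_foldl_filter]
  rw [show ((List.filter (PySem.Str.isIn "--dport") rules).foldl
        (fun (d : PySem.Dict String Int) rule => d.insert (portOfRule rule) (d.getD (portOfRule rule) 0 + 1)) PySem.Dict.empty)
      = (((List.filter (PySem.Str.isIn "--dport") rules).map portOfRule).foldl
        (fun (d : PySem.Dict String Int) x => d.insert x (d.getD x 0 + 1)) PySem.Dict.empty) from by
    simp [List.foldl_map]]
  rw [PySem.Dict.getD_foldl_insert_add_one]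
  rw [show (List.filter (PySem.Str.isIn "--dport") rules).map portOfRule
        = (dportPairs rules).map (fun p => p.1) from by
    simp only [dportPairs, List.map_map]
    rfl]
  rw [List.count_eq_countP, List.countP_map]
  simp only [PySem.Dict.getD_empty, zero_add]
  rfl

lemma foldlB_eq_scanF (counts : PySem.Dict String Int) :
    ∀ (l : List (String × String)) (out : List String) (seen : PySem.Set String),
    (l.foldl (fun (st : List String × PySem.Set String) p =>
        if counts.getD p.1 0 > 1 then
          if PySem.Set.contains st.2 p.1 then st
          else (st.1 ++ [combinedRule p.1], PySem.Set.add st.2 p.1)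
        else (st.1 ++ [p.2], st.2)) (out, seen)).1 = out ++ scanF counts l seen := by
  intro l
  induction l with
  | nil => intro out seen; simp [scanF]
  | cons p t ih =>
    intro out seen
    simp only [List.foldl_cons, scanF]
    by_cases h1 : counts.getD p.1 0 > 1
    · rw [if_pos h1, if_pos h1]
      by_cases h2 : PySem.Set.contains seen p.1
      · rw [if_pos h2, if_pos h2]
        exact ih out seen
      · simp only [h2, Bool.false_eq_true, if_false]
        rw [ih (out ++ [combinedRule p.1]) (PySem.Set.add seen p.1)]
        simp
    · rw [if_neg h1, if_neg h1]
      rw [ih (out ++ [p.2]) seen]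
      simp

lemma foldl_filter_split {s : Type} (q : String → Bool) (f : String → String)
    (B : s → String → String → s) (l : List String) (init : s) :
    l.foldl (fun st r => if q r then B st (f r) r else st) init
      = ((l.filter q).map (fun r => (f r, r))).foldl (fun st p => B st p.1 p.2) init := by
  rw [PySem.List.foldl_if_eq_foldl_filter q (fun st r => B st (f r) r) l init, List.foldl_map]

lemma B_loop (C : PySem.Dict String Int) (rules : List String) :
    (rules.foldl (fun (st : List String × PySem.Set String) rule =>
        if PySem.Str.isIn "--dport" rule then
          if C.getD (portOfRule rule) 0 > 1 then
            if PySem.Set.contains st.2 (portOfRule rule) then st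
            else (st.1 ++ [combinedRule (portOfRule rule)], PySem.Set.add st.2 (portOfRule rule))
          else (st.1 ++ [rule], st.2)
        else st) ([], PySem.Set.empty)).1
      = scanF C (dportPairs rules) [] := by
  rw [foldl_filter_split (fun r => PySem.Str.isIn "--dport" r) portOfRule
      (fun (st : List String × PySem.Set String) port rule =>
        if C.getD port 0 > 1 then
          if PySem.Set.contains st.2 port then st
          else (st.1 ++ [combinedRule port], PySem.Set.add st.2 port)
        else (st.1 ++ [rule], st.2)) rules ([], PySem.Set.empty)]
  rw [show (rules.filter (fun r => PySem.Str.isIn "--dport" r)).map (fun r => (portOfRule r, r))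
        = dportPairs rules from rfl]
  rw [foldlB_eq_scanF C (dportPairs rules) [] PySem.Set.empty]
  exact List.nil_append _

lemma B_flat (rules : List String) :
    combine_similar_rules_alt rules
      = scanF
          (rules.foldl (fun d rule =>
            if PySem.Str.isIn "--dport" rule then
              d.insert (portOfRule rule) (d.getD (portOfRule rule) 0 + 1)
            else d) PySem.Dict.empty)
          (dportPairs rules) [] :=
  B_loop _ rules

lemma scan_eq (counts : PySem.Dict String Int) (cnt : String → Nat)
    (Hcnt : ∀ k, counts.getD k 0 = (cnt k : Int)) :
    ∀ (l : List (String × String)) (seen : PySem.Set String),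
    (∀ k, l.countP (fun p => p.1 == k) ≤ cnt k) →
    (∀ k, PySem.Set.contains seen k = true → 1 < cnt k) →
    scanF counts l seen
      = ((PySem.Set.ofList (l.map (fun p => p.1))).filter
          (fun k => !PySem.Set.contains seen k)).flatMap (emitK l cnt) := by
  intro l
  induction l with
  | nil => intro seen _ _; simp [scanF, PySem.Set.ofList, PySem.Set.empty]
  | cons a t ih =>
    intro seen Hsub Hseen
    obtain ⟨k, r⟩ := a
    have hcond : (counts.getD k 0 > 1) ↔ (1 < cnt k) := by
      rw [Hcnt k]; exact_mod_cast Iff.rfl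
    have hofl : PySem.Set.ofList (((k, r) :: t).map (fun p => p.1))
        = k :: (PySem.Set.ofList (t.map (fun p => p.1))).filter (fun x => !decide (x = k)) := by
      simp only [List.map_cons]; exact set_ofList_cons k _
    have hsubt : ∀ k', t.countP (fun p => p.1 == k') ≤ cnt k' := by
      intro k'
      refine le_trans ?_ (Hsub k')
      rw [List.countP_cons]
      exact Nat.le_add_right _ _
    have hemit : ∀ x, x ≠ k → emitK ((k, r) :: t) cnt x = emitK t cnt x := by
      intro x hx
      unfold emitK
      by_cases hcx : 1 < cnt x
      · simp [hcx]
      · have hk : ¬ ((k == x) = true) := by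
          intro hh
          have hkx : k = x := by simpa using hh
          exact hx hkx.symm
        simp [hcx, List.filter_cons, hk]
    simp only [scanF]
    by_cases h1 : 1 < cnt k
    · rw [if_pos (hcond.mpr h1)]
      by_cases h2 : PySem.Set.contains seen k = true
      · rw [if_pos h2, ih seen hsubt Hseen, hofl, List.filter_cons]
        simp only [h2, Bool.not_true, Bool.false_eq_true, if_false, List.filter_filter]
        have hfil : List.filter (fun a => !PySem.Set.contains seen a && !decide (a = k))
              (PySem.Set.ofList (t.map (fun p => p.1)))
            = List.filter (fun x => !PySem.Set.contains seen x)
              (PySem.Set.ofList (t.map (fun p => p.1))) := by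
          have h2m : k ∈ seen := by simpa [contains_eq_mem] using h2
          apply List.filter_congr
          intro y _
          by_cases hys : y ∈ seen
          · simp [contains_eq_mem, hys]
          · have hyk : y ≠ k := fun hh => hys (hh ▸ h2m)
            simp [contains_eq_mem, hys, hyk]
        rw [hfil]
        refine (List.flatMap_congr fun x hx => ?_).symm
        refine hemit x fun hh => ?_
        rw [List.mem_filter] at hx
        rw [hh, h2] at hx
        simpa using hx.2
      · rw [if_neg h2]
        have hseen' : ∀ x, PySem.Set.contains (PySem.Set.add seen k) x = true → 1 < cnt x := by
          intro x hx
          rw [contains_eq_mem] at hx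
          have hx' : x ∈ PySem.Set.add seen k := by simpa using hx
          rcases (PySem.Set.mem_add seen k x).mp hx' with hxs | hxk
          · exact Hseen x (by rw [contains_eq_mem]; simpa using hxs)
          · rwa [hxk]
        rw [ih (PySem.Set.add seen k) hsubt hseen', hofl, List.filter_cons]
        have hnk : (!PySem.Set.contains seen k) = true := by
          cases hc : PySem.Set.contains seen k
          · rfl
          · exact absurd hc h2
        rw [hnk]
        simp only [if_true, List.flatMap_cons, List.filter_filter]
        have hek : emitK ((k, r) :: t) cnt k = [combinedRule k] := by
          unfold emitK; rw [if_pos h1]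
        rw [hek]
        simp only [List.singleton_append]
        congr 1
        have hfil : List.filter (fun a => !PySem.Set.contains seen a && !decide (a = k))
              (PySem.Set.ofList (t.map (fun p => p.1)))
            = List.filter (fun x => !PySem.Set.contains (PySem.Set.add seen k) x)
              (PySem.Set.ofList (t.map (fun p => p.1))) := by
          apply List.filter_congr
          intro y _
          simp only [contains_eq_mem, PySem.Set.mem_add]
          by_cases hys : y ∈ seen <;> by_cases hyk : y = k <;> simp [hys, hyk]
        rw [hfil]
        refine (List.flatMap_congr fun x hx => ?_).symm
        refine hemit x fun hh => ?_
        rw [List.mem_filter, contains_eq_mem] at hx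
        rw [hh] at hx
        have hkmem : k ∈ PySem.Set.add seen k := (PySem.Set.mem_add seen k k).mpr (Or.inr rfl)
        simp [hkmem] at hx
    · rw [if_neg (fun h => h1 (hcond.mp h))]
      have hks : PySem.Set.contains seen k = false := by
        cases hc : PySem.Set.contains seen k
        · rfl
        · exact absurd (Hseen k hc) h1
      have hct : t.countP (fun p => p.1 == k) = 0 := by
        have := Hsub k
        rw [List.countP_cons] at this
        simp only [beq_self_eq_true, if_true] at this
        omega
      have hknot : ∀ p ∈ t, ¬ ((p.1 == k) = true) :=
        fun p hp => List.countP_eq_zero.mp hct p hp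
      have hknotin : ∀ x ∈ t.map (fun p => p.1), x ≠ k := by
        intro x hx hxk
        rcases List.mem_map.mp hx with ⟨p, hp, hpx⟩
        exact hknot p hp (by rw [← hpx] at hxk; simp [hxk])
      rw [ih seen hsubt Hseen, hofl, List.filter_cons]
      have hnk : (!PySem.Set.contains seen k) = true := by rw [hks]; rfl
      rw [hnk]
      simp only [if_true, List.flatMap_cons, List.filter_filter]
      have hek : emitK ((k, r) :: t) cnt k = [r] := by
        unfold emitK
        rw [if_neg h1, List.filter_cons]
        simp only [beq_self_eq_true, if_true]
        rw [List.filter_eq_nil_iff.mpr hknot]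
        rfl
      rw [hek]
      simp only [List.singleton_append]
      congr 1
      have hfil : List.filter (fun a => !PySem.Set.contains seen a && !decide (a = k))
            (PySem.Set.ofList (t.map (fun p => p.1)))
          = List.filter (fun x => !PySem.Set.contains seen x)
            (PySem.Set.ofList (t.map (fun p => p.1))) := by
        apply List.filter_congr
        intro y hy
        have hyk : y ≠ k := hknotin y (by simpa [PySem.Set.mem_ofList] using hy)
        simp [hyk]
      rw [hfil]
      refine (List.flatMap_congr fun x hx => ?_).symm
      refine hemit x (hknotin x ?_)
      rw [List.mem_filter] at hx
      simpa [PySem.Set.mem_ofList] using hx.1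

-- ===== VERDICT (by name: the statement is the Claim_ definition above) =====
theorem combine_similar_rules_spec : Claim_equal_combine_similar_rules := by
  intro rules _ _
  unfold Spec_combine_similar_rules
  rw [A_flat, B_flat]
  rw [scan_eq _ (fun k => (dportPairs rules).countP (fun p => p.1 == k))
        (fun k => counts_getD rules k) (dportPairs rules) []
        (fun k => le_refl _)
        (fun k h => by simp [PySem.Set.contains] at h)]
  have hfil : List.filter (fun k => !PySem.Set.contains [] k)
        (PySem.Set.ofList ((dportPairs rules).map (fun p => p.1)))
      = PySem.Set.ofList ((dportPairs rules).map (fun p => p.1)) := by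
    apply List.filter_eq_self.mpr
    intro a _
    simp [PySem.Set.contains]
  rw [hfil]
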